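-- pv_equiv track=rewrite | github.com/dongmingyang2007-pixel/MRNote | apps/api/app/services/memory_v2.py | normalize_learning_stages
-- ===== SOURCE A (Python) =====
-- MEMORY_LEARNING_STAGE_ORDER = (
--     "observe",
--     "extract",
--     "consolidate",
--     "graphify",
--     "reflect",
--     "reuse",
-- )
--
-- def _normalize_string_list(values: object) -> list[str]:
--     if not isinstance(values, list):
--         return []
--     return [
--         str(value).strip()
--         for value in values
--         if isinstance(value, str) and str(value).strip()
--     ]
--
-- def normalize_learning_stages(values: object) -> list[str]:
--     normalized = _normalize_string_list(values)
--     if not normalized: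
--         return []
--     ordered: list[str] = []
--     extras: list[str] = []
--     seen: set[str] = set()
--     for stage in normalized:
--         if stage in seen:
--             continue
--         seen.add(stage)
--         if stage in MEMORY_LEARNING_STAGE_ORDER:
--             ordered.append(stage)
--         else:
--             extras.append(stage)
--     ordered.sort(
--         key=lambda item: MEMORY_LEARNING_STAGE_ORDER.index(item)
--         if item in MEMORY_LEARNING_STAGE_ORDER
--         else len(MEMORY_LEARNING_STAGE_ORDER),
--     )
--     return [*ordered, *extras]
-- ===== SOURCE B (Python) =====
-- MEMORY_LEARNING_STAGE_ORDER = (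
--     "observe",
--     "extract",
--     "consolidate",
--     "graphify",
--     "reflect",
--     "reuse",
-- )
--
--
-- def normalize_learning_stages(values: object) -> list[str]:
--     # Bucket/counting sort by canonical rank: one pass appends each normalized
--     # string to one of 7 buckets (its index in the canonical tuple, or a
--     # trailing bucket for unknown stages).  No seen-set and no dedup test in
--     # the loop: a stage always lands in the same bucket, so deduping each
--     # bucket afterwards (dict.fromkeys keeps first occurrences in order) is
--     # global dedup, and flattening the buckets yields the canonical order
--     # followed by extras in first-occurrence order.
--     if not isinstance(values, list):
--         return []
--     buckets = [[] for _ in range(len(MEMORY_LEARNING_STAGE_ORDER) + 1)]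
--     for value in values:
--         if not isinstance(value, str):
--             continue
--         stage = value.strip()
--         if not stage:
--             continue
--         try:
--             rank = MEMORY_LEARNING_STAGE_ORDER.index(stage)
--         except ValueError:
--             rank = len(MEMORY_LEARNING_STAGE_ORDER)
--         buckets[rank].append(stage)
--     return [stage for bucket in buckets for stage in dict.fromkeys(bucket)]
-- ===== Notes on version B (the rewrite author's own statement) =====
-- stated objective: alternative
-- what changed: Replaces A's dedupe-with-seen-set + partition + stable sort keyed by tuple .index with a bucket (counting) sort: one pass appends each normalized string to one of 7 rank buckets (canonical index, or a trailing extras bucket) with no seen set and no membership test in the loop; each bucket is then deduped with dict.fromkeys and the buckets are flattened.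
import Mathlib
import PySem

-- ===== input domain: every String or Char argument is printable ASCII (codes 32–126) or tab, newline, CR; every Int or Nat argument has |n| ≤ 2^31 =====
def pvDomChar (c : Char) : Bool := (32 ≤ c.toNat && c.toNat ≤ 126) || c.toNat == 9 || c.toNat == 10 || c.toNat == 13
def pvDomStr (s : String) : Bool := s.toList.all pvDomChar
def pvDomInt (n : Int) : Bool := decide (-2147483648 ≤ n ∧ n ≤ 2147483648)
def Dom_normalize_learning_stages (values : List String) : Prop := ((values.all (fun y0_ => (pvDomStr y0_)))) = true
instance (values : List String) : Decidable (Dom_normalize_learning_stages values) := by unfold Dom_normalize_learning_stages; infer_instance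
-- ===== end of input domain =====

-- B replaces A's dedupe+partition+sort-by-.index with a 7-bucket counting sort over the
-- canonical ranks, deduping each bucket at the end (objective: alternative).
-- Return-value equivalence; neither implementation mutates its argument.

-- ===== PORT A =====
def pvOrder : List String :=
  ["observe", "extract", "consolidate", "graphify", "reflect", "reuse"]

def pvNormalizeStringList (values : List String) : List String :=
  -- typed port: every element is a str, so the isinstance filter always holds
  values.filterMap (fun value =>
    let s := PySem.Str.strip value
    if s ≠ "" then some s else none)

-- sort key: MEMORY_LEARNING_STAGE_ORDER.index(item) if member else len(...);
-- .index is guarded by membership, so the getD default is never used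
def pvKeyA (item : String) : Nat :=
  if pvOrder.contains item then (PySem.List.index? pvOrder item).getD 0 else pvOrder.length

def pvStepA (acc : List String × List String × PySem.Set String) (stage : String) :
    List String × List String × PySem.Set String :=
  if PySem.Set.contains acc.2.2 stage then acc
  else
    let seen := PySem.Set.add acc.2.2 stage
    if pvOrder.contains stage then (acc.1 ++ [stage], acc.2.1, seen)
    else (acc.1, acc.2.1 ++ [stage], seen)

def normalize_learning_stages (values : List String) : List String :=
  let normalized := pvNormalizeStringList values
  if normalized = [] then []
  else
    let acc := normalized.foldl pvStepA ([], [], PySem.Set.empty)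
    PySem.List.sorted acc.1 pvKeyA false ++ acc.2.1

-- ===== PORT B =====
-- rank = MEMORY_LEARNING_STAGE_ORDER.index(stage), or len(...) on ValueError
def pvRankB (stage : String) : Nat :=
  (PySem.List.index? pvOrder stage).getD pvOrder.length

def pvStepB (buckets : List (List String)) (value : String) : List (List String) :=
  let stage := PySem.Str.strip value
  if stage = "" then buckets
  else
    let r := pvRankB stage
    buckets.set r (buckets.getD r [] ++ [stage])

-- dict.fromkeys(bucket) = PySem.List.dedup; the comprehension flattens the deduped buckets
def normalize_learning_stages_alt (values : List String) : List String :=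
  ((values.foldl pvStepB (List.replicate 7 [])).map PySem.List.dedup).flatten

-- ===== PRECONDITION & SPEC =====
def Spec_normalize_learning_stages (values : List String) (out : List String) : Prop := out = normalize_learning_stages_alt values
instance (values : List String) (out : List String) : Decidable (Spec_normalize_learning_stages values out) := by unfold Spec_normalize_learning_stages; infer_instance

-- ===== CLAIM (what is proved, stated in full; the proofs are below) =====
def Claim_equal_normalize_learning_stages : Prop := ∀ (values : List String), Dom_normalize_learning_stages values → Spec_normalize_learning_stages values (normalize_learning_stages values)

-- ===== LEMMAS AND PROOFS =====

-- dict.fromkeys of a snoc: drop the new element if already present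
theorem pvDedup_snoc (l : List String) (x : String) :
    PySem.List.dedup (l ++ [x]) = PySem.Set.add (PySem.List.dedup l) x := by
  simp [PySem.List.dedup, PySem.Set.ofList, List.foldl_append]

-- joint invariant: A's loop state (ordered, extras, seen) determines B's deduped buckets
def pvInv (a : List String × List String × PySem.Set String)
    (bkts : List (List String)) : Prop :=
  bkts.length = 7 ∧
  bkts.map PySem.List.dedup
    = pvOrder.map (fun t => if t ∈ a.1 then [t] else []) ++ [a.2.1] ∧
  (∀ x, x ∈ a.2.2 ↔ (x ∈ a.1 ∨ x ∈ a.2.1)) ∧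
  a.1.Nodup ∧ (∀ x ∈ a.1, x ∈ pvOrder) ∧ (∀ x ∈ a.2.1, x ∉ pvOrder)

set_option maxHeartbeats 4000000 in
theorem pvInv_step (a : List String × List String × PySem.Set String)
    (bkts : List (List String)) (h : pvInv a bkts) (v : String)
    (hs : PySem.Str.strip v ≠ "") :
    pvInv (pvStepA a (PySem.Str.strip v)) (pvStepB bkts v) := by
  obtain ⟨hL, h1, h2, h3, h4, h5⟩ := h
  obtain ⟨s, hsv⟩ : ∃ s', s' = PySem.Str.strip v := ⟨_, rfl⟩
  rw [← hsv] at hs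
  rw [← hsv]
  have hlen : (pvOrder.map (fun t => if t ∈ a.1 then [t] else [])).length = 6 := by
    simp [pvOrder]
  have hB : pvStepB bkts v = bkts.set (pvRankB s) (bkts.getD (pvRankB s) [] ++ [s]) := by
    simp only [pvStepB, ← hsv, if_neg hs]
  have hmapset : (pvStepB bkts v).map PySem.List.dedup
      = (bkts.map PySem.List.dedup).set (pvRankB s)
          (PySem.Set.add (PySem.List.dedup (bkts.getD (pvRankB s) [])) s) := by
    rw [hB, List.map_set, pvDedup_snoc]
  have hLB : (pvStepB bkts v).length = 7 := by rw [hB]; simp [hL]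
  by_cases hmem : s ∈ pvOrder
  · -- s is a canonical stage: rank < 6
    obtain ⟨k, hk⟩ := Option.isSome_iff_exists.1 ((PySem.List.index?_isSome_iff pvOrder s).2 hmem)
    obtain ⟨hklt, hkget, -⟩ := PySem.List.getElem_of_index?_eq_some hk
    have hr : pvRankB s = k := by unfold pvRankB; rw [hk]; rfl
    have hk6 : k < 6 := by simpa [pvOrder] using hklt
    have hd : PySem.List.dedup (bkts.getD (pvRankB s) [])
        = (if s ∈ a.1 then [s] else []) := by
      have h9 : (List.map PySem.List.dedup bkts)[k]?
          = (List.map (fun t => if t ∈ a.1 then [t] else []) pvOrder ++ [a.2.1])[k]? := by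
        rw [h1]
      rw [List.getElem?_map, List.getElem?_append_left (by omega),
        List.getElem?_map, List.getElem?_eq_getElem hklt,
        List.getElem?_eq_getElem (show k < bkts.length by omega), hkget] at h9
      simp only [Option.map_some] at h9
      rw [hr, List.getD_eq_getElem _ _ (show k < bkts.length by omega)]
      exact Option.some.inj h9
    by_cases hseen : PySem.Set.contains a.2.2 s
    · -- already seen: both sides' abstractions unchanged
      have hsm : s ∈ a.2.2 := by simpa [PySem.Set.contains] using hseen
      have hso : s ∈ a.1 := by
        rcases (h2 s).1 hsm with hx | hx
        · exact hx
        · exact absurd hmem (h5 s hx)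
      have hbA : pvStepA a s = a := by simp [pvStepA, hsm]
      rw [hbA]
      refine ⟨hLB, ?_, h2, h3, h4, h5⟩
      rw [hmapset, hd, if_pos hso]
      have hadd : PySem.Set.add [s] s = [s] := by simp [PySem.Set.add]
      rw [hadd, h1, hr, List.set_append_left _ _ (by omega)]
      congr 1
      apply List.ext_getElem (by simp)
      intro j hj1 hj2
      rw [List.getElem_set]
      by_cases hjk : k = j
      · subst hjk
        rw [if_pos rfl]
        simp only [List.getElem_map, hkget, if_pos hso]
      · rw [if_neg hjk]
    · -- new canonical stage
      have hsm : s ∉ a.2.2 := by simpa [PySem.Set.contains] using hseen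
      have hso : s ∉ a.1 := fun hx => hsm ((h2 s).2 (Or.inl hx))
      have hbA : pvStepA a s = (a.1 ++ [s], a.2.1, PySem.Set.add a.2.2 s) := by
        simp [pvStepA, hsm, hmem]
      rw [hbA]
      have hadd : PySem.Set.add a.2.2 s = a.2.2 ++ [s] := by
        simp [PySem.Set.add, PySem.Set.contains, hsm]
      refine ⟨hLB, ?_, ?_, ?_, ?_, ?_⟩
      · rw [hmapset, hd, if_neg hso]
        have hadd0 : PySem.Set.add ([] : List String) s = [s] := by simp [PySem.Set.add]
        rw [hadd0, h1, hr, List.set_append_left _ _ (by omega)]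
        show _ = pvOrder.map (fun t => if t ∈ a.1 ++ [s] then [t] else []) ++ [a.2.1]
        congr 1
        apply List.ext_getElem (by simp)
        intro j hj1 hj2
        rw [List.getElem_set]
        simp only [List.getElem_map]
        by_cases hjk : k = j
        · subst hjk
          rw [if_pos rfl, hkget]
          simp
        · rw [if_neg hjk]
          have hne : pvOrder[j] ≠ s := by
            rw [← hkget]
            intro hcon
            exact hjk ((List.Nodup.getElem_inj_iff (by decide)).1 hcon.symm)
          split_ifs with hA hiB hiB <;> try rfl
          · exact absurd (List.mem_append.2 (Or.inl hA)) hiB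
          · rcases List.mem_append.1 hiB with hx | hx
            · exact absurd hx hA
            · exact absurd (List.mem_singleton.1 hx) hne
      · intro x
        show x ∈ PySem.Set.add a.2.2 s ↔ x ∈ a.1 ++ [s] ∨ x ∈ a.2.1
        rw [hadd]
        simp only [List.mem_append, List.mem_singleton]
        rw [h2 x]
        exact or_right_comm
      · exact List.Nodup.append h3 (List.nodup_singleton s)
          (by intro x hx hxs; simp only [List.mem_singleton] at hxs; exact hso (hxs ▸ hx))
      · intro x hx
        rcases List.mem_append.1 hx with hx | hx
        · exact h4 x hx
        · simp only [List.mem_singleton] at hx; exact hx ▸ hmem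
      · exact h5
  · -- s not canonical: rank = 6, the extras bucket
    have hnone : PySem.List.index? pvOrder s = none :=
      (PySem.List.index?_eq_none_iff _ _).2 hmem
    have hr : pvRankB s = 6 := by unfold pvRankB; rw [hnone]; rfl
    have hd : PySem.List.dedup (bkts.getD (pvRankB s) []) = a.2.1 := by
      have h9 : (List.map PySem.List.dedup bkts)[6]?
          = (List.map (fun t => if t ∈ a.1 then [t] else []) pvOrder ++ [a.2.1])[6]? := by
        rw [h1]
      rw [List.getElem?_map, List.getElem?_append_right (le_of_eq hlen), hlen,
        List.getElem?_eq_getElem (show (6 : Nat) < bkts.length by omega)] at h9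
      simp only [Option.map_some, Nat.sub_self, List.getElem?_cons_zero] at h9
      rw [hr, List.getD_eq_getElem _ _ (show (6 : Nat) < bkts.length by omega)]
      exact Option.some.inj h9
    by_cases hseen : PySem.Set.contains a.2.2 s
    · have hsm : s ∈ a.2.2 := by simpa [PySem.Set.contains] using hseen
      have hse : s ∈ a.2.1 := by
        rcases (h2 s).1 hsm with hx | hx
        · exact absurd (h4 s hx) hmem
        · exact hx
      have hbA : pvStepA a s = a := by simp [pvStepA, hsm]
      rw [hbA]
      refine ⟨hLB, ?_, h2, h3, h4, h5⟩
      rw [hmapset, hd]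
      have hadd : PySem.Set.add a.2.1 s = a.2.1 := by
        simp [PySem.Set.add, PySem.Set.contains, hse]
      rw [hadd, h1, hr, List.set_append_right _ _ (le_of_eq hlen)]
      simp [hlen]
    · have hsm : s ∉ a.2.2 := by simpa [PySem.Set.contains] using hseen
      have hse : s ∉ a.2.1 := fun hx => hsm ((h2 s).2 (Or.inr hx))
      have hbA : pvStepA a s = (a.1, a.2.1 ++ [s], PySem.Set.add a.2.2 s) := by
        simp [pvStepA, hsm, hmem]
      rw [hbA]
      have hadd : PySem.Set.add a.2.2 s = a.2.2 ++ [s] := by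
        simp [PySem.Set.add, PySem.Set.contains, hsm]
      refine ⟨hLB, ?_, ?_, h3, h4, ?_⟩
      · rw [hmapset, hd]
        have haddE : PySem.Set.add a.2.1 s = a.2.1 ++ [s] := by
          simp [PySem.Set.add, PySem.Set.contains, hse]
        rw [haddE, h1, hr, List.set_append_right _ _ (le_of_eq hlen)]
        simp [hlen]
      · intro x
        show x ∈ PySem.Set.add a.2.2 s ↔ x ∈ a.1 ∨ x ∈ a.2.1 ++ [s]
        rw [hadd]
        simp only [List.mem_append, List.mem_singleton]
        rw [h2 x]
        exact or_assoc
      · intro x hx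
        rcases List.mem_append.1 hx with hx | hx
        · exact h5 x hx
        · simp only [List.mem_singleton] at hx; exact hx ▸ hmem

theorem pvInv_loop (values : List String)
    (a : List String × List String × PySem.Set String)
    (bkts : List (List String)) (h : pvInv a bkts) :
    pvInv ((pvNormalizeStringList values).foldl pvStepA a) (values.foldl pvStepB bkts) := by
  induction values generalizing a bkts with
  | nil => simpa [pvNormalizeStringList] using h
  | cons v vs ih =>
    by_cases hs : PySem.Str.strip v = ""
    · have hnorm : pvNormalizeStringList (v :: vs) = pvNormalizeStringList vs := by
        simp [pvNormalizeStringList, hs]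
      have hb : pvStepB bkts v = bkts := by simp [pvStepB, hs]
      rw [hnorm, List.foldl_cons, hb]
      exact ih a bkts h
    · have hnorm : pvNormalizeStringList (v :: vs)
          = PySem.Str.strip v :: pvNormalizeStringList vs := by
        simp [pvNormalizeStringList, hs]
      rw [hnorm, List.foldl_cons, List.foldl_cons]
      exact ih _ _ (pvInv_step a bkts h v hs)

theorem pvOrder_pairwise : pvOrder.Pairwise (fun a b => pvKeyA a < pvKeyA b) := by decide

theorem pvSorted_ordered (ordered : List String) (hnd : ordered.Nodup)
    (hsub : ∀ x ∈ ordered, x ∈ pvOrder) :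
    PySem.List.sorted ordered pvKeyA false
      = pvOrder.filter (fun t => decide (t ∈ ordered)) := by
  apply PySem.List.sorted_eq_of_perm_of_pairwise_lt
  · rw [List.perm_ext_iff_of_nodup (List.Nodup.filter _ (by decide)) hnd]
    intro x
    simp only [List.mem_filter, decide_eq_true_eq]
    exact ⟨fun ⟨_, hx⟩ => hx, fun hx => ⟨hsub x hx, hx⟩⟩
  · exact List.Pairwise.filter _ pvOrder_pairwise

theorem pvFlatten_map_ite (L : List String) (p : String → Prop) [DecidablePred p] :
    (L.map (fun t => if p t then [t] else [])).flatten = L.filter (fun t => decide (p t)) := by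
  induction L with
  | nil => rfl
  | cons x xs ih => by_cases hx : p x <;> simp [hx, ih]

-- ===== VERDICT (by name: the statement is the Claim_ definition above) =====
theorem normalize_learning_stages_spec : Claim_equal_normalize_learning_stages := by
  intro values _
  unfold Spec_normalize_learning_stages
  have hinv := pvInv_loop values ([], [], PySem.Set.empty) (List.replicate 7 [])
    ⟨by decide, by decide, by simp [PySem.Set.empty], List.nodup_nil, by simp, by simp⟩
  obtain ⟨-, h1, -, h5, h6, -⟩ := hinv
  simp only [normalize_learning_stages, normalize_learning_stages_alt]
  rw [h1]
  by_cases hn : pvNormalizeStringList values = []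
  · rw [if_pos hn]
    rw [hn] at h1 ⊢
    simp only [List.foldl_nil] at h1 ⊢
    simp
  · rw [if_neg hn, List.flatten_append, pvFlatten_map_ite,
      pvSorted_ordered _ h5 h6]
    simp
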